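-- pv_equiv track=rewrite | github.com/clemto94/revision_python | balanced_or_not.py | balancedOrNot
-- ===== SOURCE A (Python) =====
-- def balancedOrNot(expressions, maxReplacements):
--     result = []
--
--     for expr, max_repl in zip(expressions, maxReplacements):
--         stack = []
--         replacements_needed = 0
--
--         for char in expr:
--             if char == '<':
--                 stack.append(char)
--             elif char == '>':
--                 if stack:
--                     stack.pop()
--                 else:
--                     replacements_needed += 1
--
--         if not stack and replacements_needed <= max_repl:
--             result.append(1)
--         else:
--             result.append(0)
--
--     return result
-- ===== SOURCE B (Python) =====
-- def balancedOrNot(expressions, maxReplacements):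
--     result = []
--     for expr, max_repl in zip(expressions, maxReplacements):
--         expr = ''.join(c for c in expr if c in '<>')
--         while '<>' in expr:
--             expr = expr.replace('<>', '')
--         result.append(1 if '<' not in expr and expr.count('>') <= max_repl else 0)
--     return result
-- ===== Notes on version B (the rewrite author's own statement) =====
-- stated objective: alternative
-- what changed: single-pass stack simulation replaced by filtering to bracket characters and repeatedly deleting matched '<>' pairs until a fixpoint, then judging the canonical '>...><...<' remainder
import Mathlib
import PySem

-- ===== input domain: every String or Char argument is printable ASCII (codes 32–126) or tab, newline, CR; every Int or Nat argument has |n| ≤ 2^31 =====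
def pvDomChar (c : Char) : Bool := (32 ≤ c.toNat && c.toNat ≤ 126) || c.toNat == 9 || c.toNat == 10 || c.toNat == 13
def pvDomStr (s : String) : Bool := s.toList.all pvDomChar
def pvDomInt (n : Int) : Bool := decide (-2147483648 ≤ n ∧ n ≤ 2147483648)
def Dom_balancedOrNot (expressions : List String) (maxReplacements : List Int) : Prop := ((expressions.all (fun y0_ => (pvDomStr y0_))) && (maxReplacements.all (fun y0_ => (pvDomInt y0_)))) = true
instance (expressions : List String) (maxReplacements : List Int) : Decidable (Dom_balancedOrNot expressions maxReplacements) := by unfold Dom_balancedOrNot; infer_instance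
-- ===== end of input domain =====

-- B replaces A's single-pass stack scan by filtering to brackets and repeatedly deleting
-- matched '<>' pairs to a fixpoint, then judging the canonical remainder (alternative decomposition).


-- ===== PORT A =====
-- inner for-loop over the characters: state = (stack, replacements_needed)
def pvStepA (st : List Char × Int) (c : Char) : List Char × Int :=
  if c = '<' then (c :: st.1, st.2)
  else if c = '>' then
    match st.1 with
    | _ :: rest => (rest, st.2)
    | [] => (st.1, st.2 + 1)
  else st

-- outer for-loop over zip(expressions, maxReplacements), appending 1 or 0
def pvLoopA : List (String × Int) → List Int
  | [] => []
  | (expr, maxRepl) :: rest =>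
    let s := expr.toList.foldl pvStepA ([], 0)
    (if s.1 = [] ∧ s.2 ≤ maxRepl then (1 : Int) else 0) :: pvLoopA rest

def balancedOrNot (expressions : List String) (maxReplacements : List Int) : List Int :=
  pvLoopA (List.zip expressions maxReplacements)

-- ===== PORT B =====
-- '<>' in expr  (2-character substring test, ported by hand, exact)
def pvHasPair : List Char → Bool
  | c :: d :: rest => if c = '<' ∧ d = '>' then true else pvHasPair (d :: rest)
  | _ => false

-- expr.replace('<>', '') : one left-to-right pass removing non-overlapping occurrences (exact)
def pvReplOnce : List Char → List Char
  | c :: d :: rest => if c = '<' ∧ d = '>' then pvReplOnce rest else c :: pvReplOnce (d :: rest)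
  | l => l

theorem pvReplOnce_length_le (t : List Char) : (pvReplOnce t).length ≤ t.length := by
  fun_induction pvReplOnce t <;> simp_all <;> omega

theorem pvReplOnce_length_lt (t : List Char) (h : pvHasPair t = true) :
    (pvReplOnce t).length < t.length := by
  fun_induction pvReplOnce t with
  | case1 c d rest hcd =>
    have := pvReplOnce_length_le rest
    simp; omega
  | case2 c d rest hcd ih =>
    simp only [pvHasPair, if_neg hcd] at h
    have := ih h
    simp at this ⊢; omega
  | case3 l hl =>
    cases l with
    | nil => simp [pvHasPair] at h
    | cons c rest =>
      cases rest with
      | nil => simp [pvHasPair] at h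
      | cons d ds => exact (hl c d ds rfl).elim

-- the while-loop:  while '<>' in expr: expr = expr.replace('<>','')
def pvReduce (t : List Char) : List Char :=
  if hp : pvHasPair t = true then pvReduce (pvReplOnce t) else t
termination_by t.length
decreasing_by exact pvReplOnce_length_lt t hp

-- loop over zip(expressions, maxReplacements)
def pvLoopB : List (String × Int) → List Int
  | [] => []
  | (expr, maxRepl) :: rest =>
    let r := pvReduce (expr.toList.filter (fun c => c == '<' || c == '>'))
    (if '<' ∉ r ∧ (r.count '>' : Int) ≤ maxRepl then (1 : Int) else 0) :: pvLoopB rest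

def balancedOrNot_alt (expressions : List String) (maxReplacements : List Int) : List Int :=
  pvLoopB (List.zip expressions maxReplacements)

-- ===== PRECONDITION & SPEC =====
def Spec_balancedOrNot (expressions : List String) (maxReplacements : List Int) (out : List Int) : Prop := out = balancedOrNot_alt expressions maxReplacements
instance (expressions : List String) (maxReplacements : List Int) (out : List Int) : Decidable (Spec_balancedOrNot expressions maxReplacements out) := by unfold Spec_balancedOrNot; infer_instance

-- ===== CLAIM (what is proved, stated in full; the proofs are below) =====
def Claim_equal_balancedOrNot : Prop := ∀ (expressions : List String) (maxReplacements : List Int), Dom_balancedOrNot expressions maxReplacements → Spec_balancedOrNot expressions maxReplacements (balancedOrNot expressions maxReplacements)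

-- ===== LEMMAS AND PROOFS =====

-- A's fold ignores non-bracket characters
theorem pvFold_filter (t : List Char) (st : List Char × Int) :
    (t.filter (fun c => c == '<' || c == '>')).foldl pvStepA st = t.foldl pvStepA st := by
  induction t generalizing st with
  | nil => rfl
  | cons c rest ih =>
    rw [List.filter_cons]
    by_cases h : (c == '<' || c == '>') = true
    · simp only [h, if_pos, List.foldl]; exact ih _
    · have hc : ¬ c = '<' ∧ ¬ c = '>' := by simpa using h
      simp only [h, Bool.false_eq_true, if_neg, not_false_iff, List.foldl,
        pvStepA, if_neg hc.1, if_neg hc.2]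
      exact ih st

-- deleting an adjacent '<>' pair does not change A's fold state
theorem pvFold_replOnce (t : List Char) (st : List Char × Int) :
    (pvReplOnce t).foldl pvStepA st = t.foldl pvStepA st := by
  fun_induction pvReplOnce t generalizing st with
  | case1 c d rest hcd ih =>
    obtain ⟨hc, hd⟩ := hcd
    subst hc; subst hd
    have hst : pvStepA (pvStepA st '<') '>' = st := by simp [pvStepA]
    simp only [List.foldl, hst]
    exact ih st
  | case2 c d rest hcd ih =>
    simp only [List.foldl]
    exact ih _
  | case3 l hl => rfl

theorem pvFold_reduce (t : List Char) (st : List Char × Int) :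
    (pvReduce t).foldl pvStepA st = t.foldl pvStepA st := by
  fun_induction pvReduce t with
  | case1 t h ih => rw [ih]; exact pvFold_replOnce t st
  | case2 => rfl

-- pvReplOnce only deletes characters
theorem pvReplOnce_subset {c : Char} {t : List Char} (h : c ∈ pvReplOnce t) : c ∈ t := by
  fun_induction pvReplOnce t with
  | case1 a b rest hab ih => simp; right; right; exact ih h
  | case2 a b rest hab ih =>
    simp at h ⊢
    rcases h with h | h
    · exact Or.inl h
    · simpa using Or.inr (ih h)
  | case3 l hl => exact h

theorem pvReduce_subset {c : Char} {t : List Char} (h : c ∈ pvReduce t) : c ∈ t := by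
  fun_induction pvReduce t with
  | case1 t hp ih => exact pvReplOnce_subset (ih h)
  | case2 => exact h

theorem pvReduce_noPair (t : List Char) : pvHasPair (pvReduce t) = false := by
  fun_induction pvReduce t with
  | case1 t hp ih => exact ih
  | case2 t hp => simpa using hp

-- a bracket-only list with no adjacent '<>' is some '>'s followed by some '<'s
theorem pvCanonical (t : List Char) (hb : ∀ c ∈ t, c = '<' ∨ c = '>')
    (hp : pvHasPair t = false) :
    ∃ a b, t = List.replicate a '>' ++ List.replicate b '<' := by
  induction t with
  | nil => exact ⟨0, 0, rfl⟩
  | cons c rest ih =>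
    have hrest : pvHasPair rest = false := by
      cases rest with
      | nil => rfl
      | cons d ds =>
        by_cases hcd : c = '<' ∧ d = '>'
        · simp [pvHasPair, if_pos hcd] at hp
        · simpa [pvHasPair, if_neg hcd] using hp
    obtain ⟨a, b, hab⟩ := ih (fun x hx => hb x (List.mem_cons_of_mem c hx)) hrest
    rcases hb c (List.mem_cons_self) with hc | hc
    · -- c = '<' : the rest may contain no '>', i.e. a = 0
      have ha : a = 0 := by
        by_contra hne
        cases a with
        | zero => exact hne rfl
        | succ a' =>
          rw [hab] at hp
          subst hc
          simp [List.replicate_succ, pvHasPair] at hp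
      refine ⟨0, b + 1, ?_⟩
      subst hc; rw [hab, ha]
      simp [List.replicate_succ]
    · exact ⟨a + 1, b, by subst hc; rw [hab]; simp [List.replicate_succ]⟩

-- A's fold over the canonical remainder
theorem pvFold_canonical (a b : ℕ) :
    (List.replicate a '>' ++ List.replicate b '<').foldl pvStepA ([], 0) =
      (List.replicate b '<', (a : Int)) := by
  have hgt : ∀ (n : ℕ) (r : Int), (List.replicate n '>').foldl pvStepA ([], r) = ([], r + n) := by
    intro n
    induction n with
    | zero => intro r; simp
    | succ k ih =>
      intro r
      rw [List.replicate_succ, List.foldl_cons,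
        show pvStepA ([], r) '>' = (([] : List Char), r + 1) by simp [pvStepA],
        ih (r + 1)]
      push_cast; ring_nf
  have hlt : ∀ (n : ℕ) (s : List Char) (r : Int),
      (List.replicate n '<').foldl pvStepA (s, r) = (List.replicate n '<' ++ s, r) := by
    intro n
    induction n with
    | zero => intro s r; simp
    | succ k ih =>
      intro s r
      rw [List.replicate_succ, List.foldl_cons,
        show pvStepA (s, r) '<' = ('<' :: s, r) by simp [pvStepA],
        ih ('<' :: s) r]
      rw [show List.replicate k '<' ++ '<' :: s = (List.replicate k '<' ++ ['<']) ++ s by simp,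
        ← List.replicate_succ', List.replicate_succ]
  rw [List.foldl_append, hgt a 0, hlt b [] (0 + a)]
  simp

-- per-expression agreement of the two judgements
theorem pvEntry_eq (expr : String) (m : Int) :
    (let s := expr.toList.foldl pvStepA ([], 0)
     if s.1 = [] ∧ s.2 ≤ m then (1 : Int) else 0) =
    (let r := pvReduce (expr.toList.filter (fun c => c == '<' || c == '>'))
     if '<' ∉ r ∧ (r.count '>' : Int) ≤ m then (1 : Int) else 0) := by
  set t := expr.toList.filter (fun c => c == '<' || c == '>') with ht
  set r := pvReduce t with hr
  have hb : ∀ c ∈ r, c = '<' ∨ c = '>' := by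
    intro c hc
    have := pvReduce_subset (hr ▸ hc)
    rw [ht] at this
    simpa using (List.of_mem_filter this)
  obtain ⟨a, b, hab⟩ := pvCanonical r hb (hr ▸ pvReduce_noPair t)
  have hfold : expr.toList.foldl pvStepA ([], 0) = (List.replicate b '<', (a : Int)) := by
    rw [← pvFold_filter, ← ht, ← pvFold_reduce, ← hr, hab, pvFold_canonical]
  simp only [hfold, hab]
  by_cases hbz : b = 0
  · subst hbz
    simp [List.mem_replicate]
  · simp [hbz, List.mem_replicate, List.replicate_eq_nil_iff]

theorem pvLoop_eq (l : List (String × Int)) : pvLoopA l = pvLoopB l := by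
  induction l with
  | nil => rfl
  | cons p rest ih =>
    obtain ⟨e, m⟩ := p
    simp only [pvLoopA, pvLoopB, ih]
    rw [pvEntry_eq e m]

-- ===== VERDICT (by name: the statement is the Claim_ definition above) =====
theorem balancedOrNot_spec : Claim_equal_balancedOrNot := by
  intro expressions maxReplacements _
  unfold Spec_balancedOrNot balancedOrNot balancedOrNot_alt
  exact pvLoop_eq _
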